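-- pv_equiv track=rewrite | github.com/inbn6619/algorithm | 프로그래머스/성공/택배상자.py | solution
-- ===== SOURCE A (Python) =====
-- from collections import deque
--
-- def solution(order):
--     answer = 0
--
--     stack = list()
--
--     truck = list()
--
--     boxList = deque([i for i in range(1, len(order) + 1)])
--
--     for i in order:
--         if stack:
--             if stack[-1] == i:
--                 truck.append(stack.pop())
--                 continue
--         if i in boxList:
--             while boxList:
--                 target = boxList.popleft()
--
--                 if target == i:
--                     truck.append(target)
--                     break
--                 else:
--                     stack.append(target)
--         else:
--             break
--
--     answer = len(truck)
--
--     return answer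
-- ===== SOURCE B (Python) =====
-- def solution(order):
--     # No stack: a boolean "delivered" table over box numbers, a running maximum m of
--     # boxes taken off the belt, and `top`, the largest belt-taken but undelivered box
--     # (0 if none), recomputed by a downward scan over the delivered table when it is
--     # consumed.  The crane can load box v iff v is the next belt box region (m < v <= n)
--     # or v == top.
--     n = len(order)
--     delivered = [False] * (n + 1)
--     m = 0
--     top = 0
--     count = 0
--     for v in order:
--         if m < v <= n:
--             if v - 1 > m:
--                 top = v - 1
--             delivered[v] = True
--             m = v
--             count += 1
--         elif v == top and v >= 1:
--             delivered[v] = True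
--             t = v - 1
--             while t >= 1 and delivered[t]:
--                 t -= 1
--             top = t
--             count += 1
--         else:
--             break
--     return count
-- ===== Notes on version B (the rewrite author's own statement) =====
-- stated objective: alternative
-- what changed: Removes A's explicit stack and deque of pending boxes entirely: B keeps a boolean delivered table plus a running maximum m of boxes taken off the belt and a cached 'top' (the largest taken-but-undelivered box, recomputed by a downward scan over the table after a crane load); belt membership becomes the comparison m < v <= n instead of a deque scan, and the stack-top test becomes v == top (measured ~2.3x faster; no per-element stack pushes or deque traffic).
import Mathlib
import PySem

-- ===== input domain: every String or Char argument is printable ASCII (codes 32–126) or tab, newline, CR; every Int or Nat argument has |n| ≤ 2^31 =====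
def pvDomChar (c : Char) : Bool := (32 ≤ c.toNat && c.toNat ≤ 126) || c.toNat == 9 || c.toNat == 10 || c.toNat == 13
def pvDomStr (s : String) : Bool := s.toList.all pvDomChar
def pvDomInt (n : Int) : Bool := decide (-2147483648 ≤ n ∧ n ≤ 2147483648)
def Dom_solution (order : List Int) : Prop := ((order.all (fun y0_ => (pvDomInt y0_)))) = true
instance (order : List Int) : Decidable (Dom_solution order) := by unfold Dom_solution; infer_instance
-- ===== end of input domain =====

-- B removes A's stack and deque entirely: it keeps a boolean delivered table, the running
-- maximum m of boxes taken off the belt, and `top`, the largest taken-but-undelivered box,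
-- recomputed by a downward scan; membership in the belt becomes the comparison m < v ≤ n.
-- Objective: alternative data structure (no stack, no deque); measured faster in a timing run.

-- ===== PORT A =====
-- inner 'while boxList:' loop: pops from the front, pushing non-matching boxes onto the stack
-- (stack top is the list END, as in Python); returns (new boxList, new stack, whether truck grew)
def popUntilA (i : Int) : List Int → List Int → (List Int × List Int × Bool)
  | [], stack => ([], stack, false)
  | t :: rest, stack =>
    if t = i then (rest, stack, true) else popUntilA i rest (stack ++ [t])

def loopA : List Int → List Int → List Int → Int → Int
  | [], _, _, truckLen => truckLen
  | i :: rest, stack, boxList, truckLen =>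
    if stack ≠ [] ∧ stack.getLast? = some i then
      loopA rest stack.dropLast boxList (truckLen + 1)
    else if boxList.contains i then
      match popUntilA i boxList stack with
      | (bl, st, found) => loopA rest st bl (truckLen + if found then 1 else 0)
    else truckLen

def solution (order : List Int) : Int :=
  loopA order [] (PySem.List.pyRange 1 ((order.length : Int) + 1) 1) 0

-- ===== PORT B =====
-- the python 'delivered' list is ported as a function Int → Bool (list set = pointwise
-- update); exact, since only in-range indices 1..n are ever read or written
-- 'while t >= 1 and delivered[t]: t -= 1' followed by 'top = t'
def scanDown (d : Int → Bool) (t : Int) : Int :=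
  if h : 1 ≤ t ∧ d t = true then scanDown d (t - 1) else t
termination_by t.toNat
decreasing_by omega

def loopB (n : Int) : List Int → (Int → Bool) → Int → Int → Int → Int
  | [], _, _, _, count => count
  | v :: rest, d, m, top, count =>
    if m < v ∧ v ≤ n then
      loopB n rest (fun x => if x = v then true else d x) v
        (if v - 1 > m then v - 1 else top) (count + 1)
    else if v = top ∧ 1 ≤ v then
      loopB n rest (fun x => if x = v then true else d x) m
        (scanDown (fun x => if x = v then true else d x) (v - 1)) (count + 1)
    else count

def solution_alt (order : List Int) : Int :=
  loopB (order.length : Int) order (fun _ => false) 0 0 0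

-- ===== PRECONDITION & SPEC =====
def Spec_solution (order : List Int) (out : Int) : Prop := out = solution_alt order
instance (order : List Int) (out : Int) : Decidable (Spec_solution order out) := by unfold Spec_solution; infer_instance

-- ===== CLAIM (what is proved, stated in full; the proofs are below) =====
def Claim_equal_solution : Prop := ∀ (order : List Int), Dom_solution order → Spec_solution order (solution order)

-- ===== LEMMAS AND PROOFS =====

lemma contains_pyRange_one (a b i : Int) :
    (PySem.List.pyRange a b 1).contains i = decide (a ≤ i ∧ i < b) := by
  rw [List.contains_eq_mem]
  simp only [PySem.List.mem_pyRange_one]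

lemma popUntilA_range (i n : Int) :
    ∀ (k : Nat) (front : Int) (stack : List Int), (i - front).toNat = k → front ≤ i → i ≤ n →
    popUntilA i (PySem.List.pyRange front (n + 1) 1) stack =
      (PySem.List.pyRange (i + 1) (n + 1) 1, stack ++ PySem.List.pyRange front i 1, true) := by
  intro k
  induction k with
  | zero =>
    intro front stack hk h1 h2
    have he : i = front := by omega
    subst he
    rw [PySem.List.pyRange_one_cons (by omega)]
    simp [popUntilA, PySem.List.pyRange_one_eq_nil (le_refl i)]
  | succ k ih =>
    intro front stack hk h1 h2
    have hfi : front < i := by omega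
    rw [PySem.List.pyRange_one_cons (by omega)]
    simp only [popUntilA]
    rw [if_neg (by omega)]
    rw [ih (front + 1) (stack ++ [front]) (by omega) (by omega) h2]
    rw [PySem.List.pyRange_one_cons hfi]
    simp

lemma scanDown_step (d : Int → Bool) (t : Int) (h1 : 1 ≤ t) (h2 : d t = true) :
    scanDown d t = scanDown d (t - 1) := by
  rw [scanDown, dif_pos ⟨h1, h2⟩]

lemma scanDown_halt (d : Int → Bool) (t : Int) (h : ¬ (1 ≤ t ∧ d t = true)) :
    scanDown d t = t := by
  rw [scanDown, dif_neg h]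

lemma scanDown_le (d : Int → Bool) (t : Int) : scanDown d t ≤ t := by
  induction t using scanDown.induct d with
  | case1 t h ih => rw [scanDown, dif_pos h]; omega
  | case2 t h => rw [scanDown, dif_neg h]

lemma scanDown_stop (d : Int → Bool) (t : Int) :
    1 ≤ scanDown d t → d (scanDown d t) = false := by
  induction t using scanDown.induct d with
  | case1 t h ih => rw [scanDown, dif_pos h]; exact ih
  | case2 t h =>
    rw [scanDown, dif_neg h]
    intro h1
    cases hd : d t with
    | false => rfl
    | true => exact absurd ⟨h1, hd⟩ h

lemma scanDown_all (d : Int → Bool) (t : Int) :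
    ∀ x, scanDown d t < x → x ≤ t → d x = true := by
  induction t using scanDown.induct d with
  | case1 t h ih =>
    rw [scanDown, dif_pos h]
    intro x hx1 hx2
    by_cases hxt : x = t
    · exact hxt ▸ h.2
    · exact ih x hx1 (by omega)
  | case2 t h =>
    rw [scanDown, dif_neg h]
    intro x hx1 hx2
    omega

lemma scanDown_congr (d d' : Int → Bool) (t : Int)
    (h : ∀ x, 1 ≤ x → x ≤ t → d x = d' x) : scanDown d t = scanDown d' t := by
  induction t using scanDown.induct d with
  | case1 t hc ih =>
    rw [scanDown_step d t hc.1 hc.2,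
      scanDown_step d' t hc.1 ((h t hc.1 le_rfl) ▸ hc.2)]
    exact ih (fun x h1 h2 => h x h1 (by omega))
  | case2 t hc =>
    rw [scanDown_halt d t hc, scanDown_halt d' t (by
      intro hc'
      exact hc ⟨hc'.1, (h t hc'.1 le_rfl).symm ▸ hc'.2⟩)]

lemma scanDown_skip (d : Int → Bool) (a : Int) (ha : 0 ≤ a) :
    ∀ (k : Nat) (b : Int), (b - a).toNat = k → a ≤ b →
    (∀ x, a < x → x ≤ b → d x = true) → scanDown d b = scanDown d a := by
  intro k
  induction k with
  | zero =>
    intro b hk hab _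
    have : b = a := by omega
    rw [this]
  | succ k ih =>
    intro b hk hab hall
    have hb : a < b := by omega
    rw [scanDown_step d b (by omega) (hall b hb le_rfl)]
    exact ih (b - 1) (by omega) (by omega) (fun x hx1 hx2 => hall x hx1 (by omega))

lemma filter_last (d : Int → Bool) :
    ∀ (k : Nat) (m : Int), m.toNat = k → 0 ≤ m →
    ((PySem.List.pyRange 1 (m + 1) 1).filter (fun x => !(d x))).getLast?.getD 0
      = scanDown d m := by
  intro k
  induction k with
  | zero =>
    intro m hk hm
    have : m = 0 := by omega
    subst this
    rw [PySem.List.pyRange_one_eq_nil (by omega)]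
    rw [scanDown_halt d 0 (by omega)]
    rfl
  | succ k ih =>
    intro m hk hm
    have h1 : (1 : Int) ≤ m := by omega
    rw [PySem.List.pyRange_one_succ_right h1, List.filter_append]
    cases hd : d m with
    | false =>
      rw [scanDown_halt d m (by simp [hd])]
      simp [hd]
    | true =>
      rw [scanDown_step d m h1 hd]
      have hnil : List.filter (fun x => !(d x)) [m] = [] := by simp [hd]
      rw [hnil, List.append_nil]
      have h2 := ih (m - 1) (by omega) (by omega)
      have hm1 : m - 1 + 1 = m := by omega
      rw [hm1] at h2
      exact h2

lemma mem_filter_range_bounds (d : Int → Bool) (m x : Int)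
    (hx : x ∈ (PySem.List.pyRange 1 (m + 1) 1).filter (fun x => !(d x))) :
    1 ≤ x ∧ x ≤ m := by
  have := List.of_mem_filter hx
  have hm := List.mem_of_mem_filter hx
  rw [PySem.List.mem_pyRange_one] at hm
  omega

-- A's stack-top test, phrased through scanDown via the filter invariant
lemma topA_iff (d : Int → Bool) (m i : Int) (hm : 0 ≤ m) :
    ((((PySem.List.pyRange 1 (m + 1) 1).filter (fun x => !(d x))) ≠ [] ∧
      ((PySem.List.pyRange 1 (m + 1) 1).filter (fun x => !(d x))).getLast? = some i))
      ↔ (i = scanDown d m ∧ 1 ≤ i) := by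
  have hf := filter_last d m.toNat m rfl hm
  constructor
  · rintro ⟨hne, hlast⟩
    have hb := mem_filter_range_bounds d m i (List.mem_of_getLast? hlast)
    rw [hlast] at hf
    simp at hf
    exact ⟨by omega, hb.1⟩
  · rintro ⟨hi, h1⟩
    cases hl : ((PySem.List.pyRange 1 (m + 1) 1).filter (fun x => !(d x))).getLast? with
    | none =>
      rw [hl] at hf
      simp at hf
      omega
    | some y =>
      rw [hl] at hf
      simp at hf
      have hy : y = i := by omega
      constructor
      · intro hnil
        rw [hnil] at hl
        simp at hl
      · rw [hy]

-- main loop equivalence under the state invariant: A's stack is the ascending list of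
-- undelivered boxes in [1, m], A's boxList is [m+1, n], B's top is scanDown d m
lemma loop_eq (n : Int) (order : List Int) :
    ∀ (d : Int → Bool) (m count : Int), 0 ≤ m → m ≤ n →
    (∀ x, d x = true → 1 ≤ x ∧ x ≤ m) →
    loopA order ((PySem.List.pyRange 1 (m + 1) 1).filter (fun x => !(d x)))
      (PySem.List.pyRange (m + 1) (n + 1) 1) count
      = loopB n order d m (scanDown d m) count := by
  induction order with
  | nil => intro d m count _ _ _; rfl
  | cons v rest ih =>
    intro d m count hm0 hmn hsub
    simp only [loopA, loopB]
    by_cases h1 : v = scanDown d m ∧ 1 ≤ v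
    · -- pop branch: v is the stack top
      have hvm : v ≤ m := h1.1 ▸ scanDown_le d m
      have hdv : d v = false := h1.1 ▸ scanDown_stop d m (h1.1 ▸ h1.2)
      have hdel : ∀ x, v < x → x ≤ m → d x = true := by
        intro x hx1 hx2
        exact scanDown_all d m x (h1.1 ▸ hx1) hx2
      rw [if_pos ((topA_iff d m v hm0).mpr h1)]
      rw [if_neg (by omega), if_pos h1]
      set d' : Int → Bool := fun x => if x = v then true else d x with hd'
      have hsplit : PySem.List.pyRange 1 (m + 1) 1
          = PySem.List.pyRange 1 (v + 1) 1 ++ PySem.List.pyRange (v + 1) (m + 1) 1 :=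
        PySem.List.pyRange_one_append 1 (v + 1) (m + 1) (by omega) (by omega)
      have hfilt2 : (PySem.List.pyRange (v + 1) (m + 1) 1).filter (fun x => !(d x)) = [] := by
        rw [List.filter_eq_nil_iff]
        intro x hx
        rw [PySem.List.mem_pyRange_one] at hx
        simp [hdel x (by omega) (by omega)]
      have hfilt2' : (PySem.List.pyRange (v + 1) (m + 1) 1).filter (fun x => !(d' x)) = [] := by
        rw [List.filter_eq_nil_iff]
        intro x hx
        rw [PySem.List.mem_pyRange_one] at hx
        simp [hd', hdel x (by omega) (by omega)]
      have hlow : (PySem.List.pyRange 1 v 1).filter (fun x => !(d' x))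
          = (PySem.List.pyRange 1 v 1).filter (fun x => !(d x)) := by
        apply List.filter_congr
        intro x hx
        rw [PySem.List.mem_pyRange_one] at hx
        simp [hd', show x ≠ v by omega]
      have hstack : (PySem.List.pyRange 1 (m + 1) 1).filter (fun x => !(d x))
          = (PySem.List.pyRange 1 v 1).filter (fun x => !(d x)) ++ [v] := by
        rw [hsplit, List.filter_append, hfilt2, List.append_nil,
          PySem.List.pyRange_one_succ_right (by omega), List.filter_append]
        simp [hdv]
      have hstack' : (PySem.List.pyRange 1 (m + 1) 1).filter (fun x => !(d' x))
          = (PySem.List.pyRange 1 v 1).filter (fun x => !(d x)) := by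
        rw [hsplit, List.filter_append, hfilt2', List.append_nil,
          PySem.List.pyRange_one_succ_right (by omega), List.filter_append, hlow]
        simp [hd']
      have hdrop : ((PySem.List.pyRange 1 (m + 1) 1).filter (fun x => !(d x))).dropLast
          = (PySem.List.pyRange 1 (m + 1) 1).filter (fun x => !(d' x)) := by
        rw [hstack, hstack', List.dropLast_concat]
      have hskip : scanDown d' m = scanDown d' (v - 1) := by
        apply scanDown_skip d' (v - 1) (by omega) (m - (v - 1)).toNat m rfl (by omega)
        intro x hx1 hx2
        by_cases hxv : x = v
        · simp [hd', hxv]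
        · simp only [hd', if_neg hxv]
          exact hdel x (by omega) hx2
      rw [hdrop, ← hskip]
      exact ih d' m (count + 1) hm0 hmn (by
        intro x hx
        by_cases hxv : x = v
        · omega
        · simp [hd', hxv] at hx
          exact hsub x hx)
    · rw [if_neg (by
        intro hc
        exact h1 ((topA_iff d m v hm0).mp hc))]
      rw [contains_pyRange_one]
      by_cases h2 : m < v ∧ v ≤ n
      · -- push branch: v comes off the belt, m+1..v-1 go to the stack
        rw [if_pos (by simp; omega), if_pos h2]
        rw [popUntilA_range v n (v - (m + 1)).toNat (m + 1) _ rfl (by omega) h2.2]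
        set d' : Int → Bool := fun x => if x = v then true else d x with hd'
        have hfilt : (PySem.List.pyRange 1 (v + 1) 1).filter (fun x => !(d' x))
            = (PySem.List.pyRange 1 (m + 1) 1).filter (fun x => !(d x))
              ++ PySem.List.pyRange (m + 1) v 1 := by
          rw [PySem.List.pyRange_one_append 1 (m + 1) (v + 1) (by omega) (by omega),
            List.filter_append]
          congr 1
          · apply List.filter_congr
            intro x hx
            rw [PySem.List.mem_pyRange_one] at hx
            simp [hd', show x ≠ v by omega]
          · rw [PySem.List.pyRange_one_succ_right (by omega), List.filter_append]
            have hkeep : (PySem.List.pyRange (m + 1) v 1).filter (fun x => !(d' x))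
                = PySem.List.pyRange (m + 1) v 1 := by
              rw [List.filter_eq_self]
              intro x hx
              rw [PySem.List.mem_pyRange_one] at hx
              have hdx : d x = false := by
                cases h : d x with
                | false => rfl
                | true => have := hsub x h; omega
              simp [hd', show x ≠ v by omega, hdx]
            rw [hkeep]
            simp [hd']
        have hv1 : (1 : Int) ≤ v := by omega
        have htop : (if v - 1 > m then v - 1 else scanDown d m) = scanDown d' v := by
          have hdv' : d' v = true := by simp [hd']
          rw [scanDown_step d' v hv1 hdv']
          by_cases hgap : v - 1 > m
          · rw [if_pos hgap]
            have hfa : d' (v - 1) = false := by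
              have hda : d (v - 1) = false := by
                cases h : d (v - 1) with
                | false => rfl
                | true => have := hsub _ h; omega
              simp [hd', show v - 1 ≠ v by omega, hda]
            rw [scanDown_halt d' (v - 1) (by simp [hfa])]
          · rw [if_neg hgap]
            have hvm : v - 1 = m := by omega
            rw [hvm]
            exact scanDown_congr d d' m
              (fun x hx1 hx2 => by simp [hd', show x ≠ v by omega])
        rw [htop]
        have hih := ih d' v (count + 1) (by omega) h2.2 (by
          intro x hx
          by_cases hxv : x = v
          · omega
          · simp [hd', hxv] at hx
            have := hsub x hx
            omega)
        rw [hfilt] at hih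
        simpa using hih
      · rw [if_neg (by simp; omega), if_neg h2, if_neg h1]

-- ===== VERDICT (by name: the statement is the Claim_ definition above) =====
theorem solution_spec : Claim_equal_solution := by
  intro order _
  unfold Spec_solution solution solution_alt
  have h := loop_eq (order.length : Int) order (fun _ => false) 0 0 (le_refl 0)
    (Int.natCast_nonneg _) (by intro x h; simp at h)
  have h0 : scanDown (fun _ => false) 0 = 0 := scanDown_halt _ 0 (by omega)
  rw [h0] at h
  rw [PySem.List.pyRange_one_eq_nil (by omega : (0 : Int) + 1 ≤ 1)] at h
  simpa using h
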